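-- pv_equiv track=rewrite | github.com/PaLy/Contest | src/codejam/s2020/round1c/b.py | dd
-- ===== SOURCE A (Python) =====
-- def dd(x):
--     res = 0
--     last = 0
--     while x > 0:
--         last = x
--         x //= 10
--         res += 1
--     return res, last
-- ===== SOURCE B (Python) =====
-- def dd(x):
--     if x <= 0:
--         return 0, 0
--     s = str(x)
--     return len(s), int(s[0])
-- ===== Notes on version B (the rewrite author's own statement) =====
-- stated objective: simpler
-- what changed: B replaces A's repeated floor-division counting loop with one decimal-string conversion: the length of str(x) gives the digit count and its first character the leading digit, with a non-positive guard reproducing A's empty-loop result.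
import Mathlib
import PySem

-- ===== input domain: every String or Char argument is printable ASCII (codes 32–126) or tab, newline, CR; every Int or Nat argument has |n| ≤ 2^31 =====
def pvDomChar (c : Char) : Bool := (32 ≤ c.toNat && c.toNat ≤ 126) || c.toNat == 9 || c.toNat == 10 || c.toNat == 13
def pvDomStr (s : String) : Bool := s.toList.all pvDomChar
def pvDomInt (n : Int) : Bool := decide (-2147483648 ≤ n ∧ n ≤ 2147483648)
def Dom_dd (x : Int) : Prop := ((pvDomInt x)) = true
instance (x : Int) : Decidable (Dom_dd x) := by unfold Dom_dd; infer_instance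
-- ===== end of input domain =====

-- B replaces A's repeated-division counting loop with a single conversion to the decimal
-- string: digit count = len(str(x)), leading digit = int(str(x)[0]) (objective: simpler).

-- ===== PORT A =====
-- the while-loop of A: state (x, res, last), one iteration per division by 10
def ddLoop (x res last : Int) : Int × Int :=
  if h : x > 0 then ddLoop (PySem.Int.floordiv x 10) (res + 1) x else (res, last)
termination_by x.toNat
decreasing_by
  have h10 : PySem.Int.floordiv x 10 = x / 10 := PySem.Int.floordiv_eq_ediv_of_pos (by omega)
  rw [h10]; omega

def dd (x : Int) : Int × Int := ddLoop x 0 0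

-- ===== PORT B =====
def dd_alt (x : Int) : Int × Int :=
  if x ≤ 0 then (0, 0)
  else
    -- s = str(x); int(s[0]): s[0] is a one-character string; both lookups always succeed for x > 0
    (PySem.Str.len (PySem.Int.toStr x),
     match PySem.Str.pyGet? (PySem.Int.toStr x) 0 with
     | some c => (PySem.Int.ofChars? [c]).getD 0
     | none => 0)

-- ===== PRECONDITION & SPEC =====
def Spec_dd (x : Int) (out : Int × Int) : Prop := out = dd_alt x
instance (x : Int) (out : Int × Int) : Decidable (Spec_dd x out) := by unfold Spec_dd; infer_instance

-- ===== CLAIM (what is proved, stated in full; the proofs are below) =====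
def Claim_equal_dd : Prop := ∀ (x : Int), Dom_dd x → Spec_dd x (dd x)

-- ===== LEMMAS AND PROOFS =====

-- number of decimal digits and leading decimal digit of a positive natural number
def nd (n : Nat) : Nat := if n < 10 then 1 else nd (n / 10) + 1
decreasing_by exact Nat.div_lt_self (by omega) (by omega)

def ld (n : Nat) : Nat := if n < 10 then n else ld (n / 10)
decreasing_by exact Nat.div_lt_self (by omega) (by omega)

-- decimal digit characters of n, most significant first
def digitsRev (n : Nat) : List Char :=
  if n < 10 then [Nat.digitChar n] else digitsRev (n / 10) ++ [Nat.digitChar (n % 10)]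
decreasing_by exact Nat.div_lt_self (by omega) (by omega)


lemma nd_ge {n : Nat} (h : ¬ n < 10) : nd n = nd (n / 10) + 1 := by
  conv_lhs => rw [nd]
  rw [if_neg h]

lemma ld_ge {n : Nat} (h : ¬ n < 10) : ld n = ld (n / 10) := by
  conv_lhs => rw [ld]
  rw [if_neg h]

lemma digitsRev_ge {n : Nat} (h : ¬ n < 10) :
    digitsRev n = digitsRev (n / 10) ++ [Nat.digitChar (n % 10)] := by
  conv_lhs => rw [digitsRev]
  rw [if_neg h]

lemma ld_lt_ten (n : Nat) : ld n < 10 := by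
  induction n using Nat.strong_induction_on with
  | _ n ih =>
    rw [ld]
    split
    · omega
    · exact ih (n / 10) (Nat.div_lt_self (by omega) (by omega))

lemma ddLoop_spec (n : Nat) (hn : 1 ≤ n) (res last : Int) :
    ddLoop (n : Int) res last = (res + (nd n : Int), (ld n : Int)) := by
  induction n using Nat.strong_induction_on generalizing res last with
  | _ n ih =>
    rw [ddLoop]
    have hpos : (n : Int) > 0 := by exact_mod_cast hn
    rw [dif_pos hpos]
    have hdiv : PySem.Int.floordiv (n : Int) 10 = ((n / 10 : Nat) : Int) :=
      PySem.Int.floordiv_natCast n 10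
    rw [hdiv]
    by_cases h10 : n < 10
    · have hz : n / 10 = 0 := Nat.div_eq_of_lt h10
      rw [hz]
      rw [ddLoop]
      rw [dif_neg (by norm_num)]
      rw [nd, ld, if_pos h10, if_pos h10]
      simp
    · have h1 : 1 ≤ n / 10 := (Nat.one_le_div_iff (by omega)).mpr (by omega)
      rw [ih (n / 10) (Nat.div_lt_self (by omega) (by omega)) h1]
      rw [nd_ge h10, ld_ge h10]
      simp only [Prod.mk.injEq]
      refine ⟨by push_cast; ring, trivial⟩

lemma toDigitsCore_eq (f : Nat) : ∀ (n : Nat) (l : List Char), n < f →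
    Nat.toDigitsCore 10 f n l = digitsRev n ++ l := by
  induction f with
  | zero => intro n l h; omega
  | succ f ih =>
    intro n l h
    rw [Nat.toDigitsCore]
    by_cases h10 : n < 10
    · have hz : n / 10 = 0 := Nat.div_eq_of_lt h10
      rw [hz, if_pos rfl, digitsRev, if_pos h10, Nat.mod_eq_of_lt h10]
      rfl
    · have hz : ¬ n / 10 = 0 := by
        have := (Nat.one_le_div_iff (show 0 < 10 by omega)).mpr (show 10 ≤ n by omega); omega
      rw [if_neg hz]
      have hlt : n / 10 < f := by
        have := Nat.div_lt_self (show 0 < n by omega) (show 1 < 10 by omega); omega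
      rw [ih (n / 10) _ hlt, digitsRev_ge h10]
      simp

lemma digitsRev_eq_cons (n : Nat) (hn : 1 ≤ n) :
    ∃ t : List Char, digitsRev n = Nat.digitChar (ld n) :: t ∧ t.length + 1 = nd n := by
  induction n using Nat.strong_induction_on with
  | _ n ih =>
    rw [digitsRev, nd, ld]
    by_cases h10 : n < 10
    · exact ⟨[], by simp [h10]⟩
    · rw [if_neg h10, if_neg h10, if_neg h10, ← digitsRev_ge h10, digitsRev_ge h10]
      have h1 : 1 ≤ n / 10 := (Nat.one_le_div_iff (by omega)).mpr (by omega)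
      obtain ⟨t, ht, hl⟩ := ih (n / 10) (Nat.div_lt_self (by omega) (by omega)) h1
      exact ⟨t ++ [Nat.digitChar (n % 10)], by rw [ht]; simp, by simp; omega⟩

lemma ofChars_digitChar (d : Nat) (hd : d < 10) :
    PySem.Int.ofChars? [Nat.digitChar d] = some (d : Int) := by
  interval_cases d <;> decide

-- ===== VERDICT (by name: the statement is the Claim_ definition above) =====
theorem dd_spec : Claim_equal_dd := by
  intro x _
  unfold Spec_dd dd dd_alt
  by_cases hx : x ≤ 0
  · rw [ddLoop, dif_neg (by omega), if_pos hx]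
  · rw [if_neg hx]
    have hn : 1 ≤ x.toNat := by omega
    have hxe : x = (x.toNat : Int) := by omega
    rw [hxe, ddLoop_spec x.toNat hn 0 0]
    set n := x.toNat with hn'
    have hchars : PySem.Int.toChars (n : Int) = digitsRev n := by
      unfold PySem.Int.toChars
      rw [if_neg (by omega)]
      simp only [Int.toNat_natCast]
      rw [Nat.toDigits, toDigitsCore_eq (n + 1) n [] (by omega), List.append_nil]
    obtain ⟨t, ht, hl⟩ := digitsRev_eq_cons n hn
    have hlist : (PySem.Int.toStr (n : Int)).toList = Nat.digitChar (ld n) :: t := by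
      rw [PySem.Int.toList_toStr, hchars, ht]
    have hlen : PySem.Str.len (PySem.Int.toStr (n : Int)) = (0 : Int) + (nd n : Int) := by
      rw [PySem.Str.len_eq, hlist]
      simp
      omega
    have hget : PySem.Str.pyGet? (PySem.Int.toStr (n : Int)) 0 = some (Nat.digitChar (ld n)) := by
      simp [PySem.Str.pyGet?, hlist, PySem.Chars.pyGet?, PySem.List.pyGet?, PySem.List.pyIdx?]
    rw [hlen, hget]
    simp only [Prod.mk.injEq, true_and]
    rw [ofChars_digitChar (ld n) (ld_lt_ten n)]
    rfl
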